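-- pv_equiv track=rewrite | github.com/GrexThinh/AI_Logic | PS4/SRC/solveKB.py | solveKB
-- ===== SOURCE A (Python) =====
-- def checkLiteralOpposite(l1, l2):
--     if l1[0]=='-' and l1[1]==l2[0]: return True
--     elif l2[0]=='-' and l2[1]==l1[0]: return True
--     else: return False
--
-- def checkDuplicate(clause):
--     i=0
--     n=len(clause)
--     while i<n:
--         check=False
--         for j in range(i+1,n):
--             if clause[i]==clause[j]:
--                 del clause[j]
--                 check=True
--                 break
--         if check==True:
--             i=0
--             n-=1
--         else: i+=1
--     return clause
--
-- def sorter(elem):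
--     if len(elem)==2: return elem[1]
--     else: return elem[0]
--
-- def solveKB(KB):
--     new_literals=[]
--     original_len=len(KB)
--     checkEntail=False
--     for i in range(0, len(KB)):
--         for j in range(i+1,len(KB)):
--             s=KB[i]+' '+KB[j]
--             s=s.split()
--             n=len(s)
--             k=0
--             count=0
--             while k<n:
--                 check=False
--                 for m in range(k+1, n):
--                     if checkLiteralOpposite(s[k],s[m])==True:
--                         del s[m]
--                         del s[k]
--                         check=True
--                         count+=1
--                         n -= 2
--                         break
--                 if check==True:
--                     k=0
--                 else:
--                     k+=1
--             if count==1: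
--                 s=sorted(s, key=sorter)
--                 res=[]
--                 if (len(s)==1):
--                     res=s
--                 else:
--                     s = checkDuplicate(s)
--                     cls=''
--                     for lit in range(len(s)):
--                         cls+=s[lit]
--                         if lit!=len(s)-1: cls+='  '
--                     if cls=='':
--                         cls='{}'
--                         checkEntail=True
--                     res.append(cls)
--                 new_literals.extend(res)
--
--     KB.extend(new_literals)
--     KB = checkDuplicate(KB)
--
--     checkNewKB=False
--     if (original_len<len(KB)): checkNewKB=True
--
--     count=len(KB)-original_len
--
--     new_cls=[]
--     for cls in range(original_len, len(KB)):
--         new_cls.append(KB[cls])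
--
--     return checkNewKB, checkEntail, count, KB, new_cls
-- ===== SOURCE B (Python) =====
-- # B: per-pair cancellation via one counting pass (sum of min(pos,neg) per variable)
-- # and an occurrence-index filter, plus single-pass seen-set dedup, instead of A's
-- # restart-based delete loops.  Note: unlike A, B does not mutate KB in place;
-- # the equivalence claimed is about the return value only.
--
-- def solveKB(KB):
--     new_literals = []
--     original_len = len(KB)
--     checkEntail = False
--     for i in range(original_len):
--         for j in range(i + 1, original_len):
--             s = (KB[i] + ' ' + KB[j]).split()
--             cnt = {}
--             for t in s:
--                 k = (t[1], True) if t[0] == '-' else (t[0], False)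
--                 cnt[k] = cnt.get(k, 0) + 1
--             count = sum(min(c, cnt.get((v, True), 0))
--                         for (v, neg), c in cnt.items() if not neg)
--             if count == 1:
--                 seen = {}
--                 surv = []
--                 for t in s:
--                     k = (t[1], True) if t[0] == '-' else (t[0], False)
--                     idx = seen.get(k, 0)
--                     seen[k] = idx + 1
--                     m = min(cnt.get((k[0], False), 0), cnt.get((k[0], True), 0))
--                     if idx >= m:
--                         surv.append(t)
--                 surv = sorted(surv, key=lambda e: e[1] if len(e) == 2 else e[0])
--                 if len(surv) == 1:
--                     new_literals.extend(surv)
--                 else: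
--                     cls = '  '.join(dict.fromkeys(surv))
--                     if cls == '':
--                         cls = '{}'
--                         checkEntail = True
--                     new_literals.append(cls)
--     out = list(dict.fromkeys(KB + new_literals))
--     count = len(out) - original_len
--     return count > 0, checkEntail, count, out, out[original_len:]
-- ===== Notes on version B (the rewrite author's own statement) =====
-- stated objective: faster
-- what changed: The restart-based delete loop that cancels complementary literal pairs is replaced by one counting pass (per variable, min(positive, negative) occurrences) plus an occurrence-index filter for the surviving literals, and both restart-based checkDuplicate dedups are replaced by single-pass ordered dedup (dict.fromkeys); the pair loop and the result tuple are unchanged.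
-- outside the precondition, e.g. on solveKB(['- a', 'b']): A raises IndexError, B raises IndexError
import Mathlib
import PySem

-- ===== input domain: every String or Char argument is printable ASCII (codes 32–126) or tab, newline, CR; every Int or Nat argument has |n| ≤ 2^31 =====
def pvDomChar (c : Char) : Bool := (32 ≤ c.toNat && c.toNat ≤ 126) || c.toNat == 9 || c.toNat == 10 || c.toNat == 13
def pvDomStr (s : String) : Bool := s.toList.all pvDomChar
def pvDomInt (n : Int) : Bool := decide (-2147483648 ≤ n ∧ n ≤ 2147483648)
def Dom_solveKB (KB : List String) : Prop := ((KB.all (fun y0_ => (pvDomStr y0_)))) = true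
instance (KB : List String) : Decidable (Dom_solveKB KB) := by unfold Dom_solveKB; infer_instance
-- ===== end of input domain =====

-- B replaces A's restart-based cancellation and duplicate-removal loops by one counting
-- pass (sum over variables of min(positive, negative) occurrences), an occurrence-index
-- filter, and a single-pass ordered dedup; A mutates KB in place (extend / in-place
-- dedup), B does not — the equivalence proved here is about the return value only.

-- ===== PORT A =====

-- l1[0]/l1[1]/l2[0]/l2[1]: under Pre_ every token is nonempty and a '-'-initial token has
-- a second character, so getD with a junk default is exact where Python does not raise.
def checkLiteralOpposite (l1 l2 : String) : Bool :=
  if (l1.toList.getD 0 ' ' == '-') && (l1.toList.getD 1 ' ' == l2.toList.getD 0 ' ') then true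
  else if (l2.toList.getD 0 ' ' == '-') && (l2.toList.getD 1 ' ' == l1.toList.getD 0 ' ') then true
  else false

-- 'for m in range(k+1, n): if p(s[m]): break' — index of the first hit, as an offset
def findFirst (p : String → Bool) : List String → Option Nat
  | [] => none
  | t :: ts => if p t then some 0 else (findFirst p ts).map (· + 1)

theorem findFirst_some_lt {p : String → Bool} {l : List String} {d : Nat}
    (h : findFirst p l = some d) : d < l.length := by
  induction l generalizing d with
  | nil => simp [findFirst] at h
  | cons t ts ih =>
    simp only [findFirst] at h
    by_cases hp : p t
    · rw [if_pos hp] at h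
      obtain rfl : (0 : Nat) = d := Option.some.inj h
      simp
    · rw [if_neg hp] at h
      cases hfd : findFirst p ts with
      | none => simp [hfd] at h
      | some d' =>
        simp only [hfd, Option.map_some] at h
        obtain rfl : d' + 1 = d := Option.some.inj h
        simpa using ih hfd

-- the inner 'while k < n' loop of solveKB: del s[m]; del s[k]; restart at k = 0
def cancelLoop (s : List String) (k cnt : Nat) : List String × Nat :=
  if hk : k < s.length then
    match hf : findFirst (fun t => checkLiteralOpposite s[k] t) (s.drop (k + 1)) with
    | some d => cancelLoop ((s.eraseIdx (k + 1 + d)).eraseIdx k) 0 (cnt + 1)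
    | none => cancelLoop s (k + 1) cnt
  else (s, cnt)
termination_by (s.length, s.length - k)
decreasing_by
  · have hd := findFirst_some_lt hf
    have h1 : k + 1 + d < s.length := by
      have : (s.drop (k + 1)).length = s.length - (k + 1) := by simp
      omega
    have h2 : (s.eraseIdx (k + 1 + d)).length = s.length - 1 := by
      simp [List.length_eraseIdx, h1]
    have h4 : ((s.eraseIdx (k + 1 + d)).eraseIdx k).length = s.length - 2 := by
      rw [List.length_eraseIdx, h2, if_pos (by omega : k < s.length - 1)]; omega
    left
    omega
  · right; omega

-- checkDuplicate: del clause[j]; restart at i = 0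
def cdLoop (clause : List String) (i : Nat) : List String :=
  if hi : i < clause.length then
    match hf : findFirst (fun t => clause[i] == t) (clause.drop (i + 1)) with
    | some d => cdLoop (clause.eraseIdx (i + 1 + d)) 0
    | none => cdLoop clause (i + 1)
  else clause
termination_by (clause.length, clause.length - i)
decreasing_by
  · have hd := findFirst_some_lt hf
    have h1 : i + 1 + d < clause.length := by
      have : (clause.drop (i + 1)).length = clause.length - (i + 1) := by simp
      omega
    left
    simp [List.length_eraseIdx, h1]
    omega
  · right; omega

def sorter (e : String) : Char :=
  if e.toList.length = 2 then e.toList.getD 1 ' ' else e.toList.getD 0 ' '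

-- cls accumulation loop: s[lit] plus '  ' between consecutive elements
def clsJoin : List String → String
  | [] => ""
  | [x] => x
  | x :: y :: rest => x ++ "  " ++ clsJoin (y :: rest)

def pairResA (a b : String) : List String × Bool :=
  let s0 := PySem.Str.split₀ (a ++ " " ++ b)
  let r := cancelLoop s0 0 0
  if r.2 = 1 then
    let s2 := PySem.List.sorted r.1 sorter
    if s2.length = 1 then (s2, false)
    else
      let s3 := cdLoop s2 0
      let cls := clsJoin s3
      if cls = "" then (["{}"], true) else ([cls], false)
  else ([], false)

def solveKB (KB : List String) : Bool × Bool × Int × List String × List String :=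
  let n : Int := KB.length
  let st := (PySem.List.pyRange 0 n).foldl (fun (acc : List String × Bool) i =>
      (PySem.List.pyRange (i + 1) n).foldl (fun acc2 j =>
        let r := pairResA (PySem.List.pyGetD KB i "") (PySem.List.pyGetD KB j "")
        (acc2.1 ++ r.1, acc2.2 || r.2)) acc) ([], false)
  let KB2 := cdLoop (KB ++ st.1) 0
  let checkNewKB := decide ((KB.length : Int) < KB2.length)
  let count : Int := (KB2.length : Int) - KB.length
  let newCls := (PySem.List.pyRange (KB.length : Int) (KB2.length : Int)).foldl
      (fun acc c => acc ++ [PySem.List.pyGetD KB2 c ""]) []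
  (checkNewKB, st.2, count, KB2, newCls)

-- ===== PORT B =====

-- (var, is_negative) key of a literal: (t[1], True) if t[0] == '-' else (t[0], False)
def tkey (t : String) : Char × Bool :=
  match t.toList with
  | '-' :: c :: _ => (c, true)
  | c :: _ => (c, false)
  | [] => (' ', false)

def pairResB (a b : String) : List String × Bool :=
  let s0 := PySem.Str.split₀ (a ++ " " ++ b)
  let cnt := s0.foldl (fun d t => d.modify (tkey t) 0 (· + 1)) PySem.Dict.empty
  let total : Int := ((cnt.items.filter (fun kv => !kv.1.2)).map
      (fun kv => min kv.2 (cnt.getD (kv.1.1, true) 0))).sum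
  if total = 1 then
    let surv := (s0.foldl (fun (st : PySem.Dict (Char × Bool) Int × List String) t =>
        let k := tkey t
        let idx := st.1.getD k 0
        let m := min (cnt.getD (k.1, false) 0) (cnt.getD (k.1, true) 0)
        (st.1.insert k (idx + 1), if m ≤ idx then st.2 ++ [t] else st.2)) (PySem.Dict.empty, [])).2
    let s2 := PySem.List.sorted surv sorter
    if s2.length = 1 then (s2, false)
    else
      let cls := PySem.Str.join "  " (PySem.List.dedup s2)
      if cls = "" then (["{}"], true) else ([cls], false)
  else ([], false)

def solveKB_alt (KB : List String) : Bool × Bool × Int × List String × List String :=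
  let n : Int := KB.length
  let st := (PySem.List.pyRange 0 n).foldl (fun (acc : List String × Bool) i =>
      (PySem.List.pyRange (i + 1) n).foldl (fun acc2 j =>
        let r := pairResB (PySem.List.pyGetD KB i "") (PySem.List.pyGetD KB j "")
        (acc2.1 ++ r.1, acc2.2 || r.2)) acc) ([], false)
  let out := PySem.List.dedup (KB ++ st.1)
  let count : Int := (out.length : Int) - KB.length
  (decide (0 < count), st.2, count, out, out.drop KB.length)

-- ===== PRECONDITION & SPEC =====

-- a token is a literal the program parses sanely: nonempty, and if it starts with '-'
-- it has a second character (token '-' raises IndexError in checkLiteralOpposite)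
-- that is itself not '-' (tokens starting '--' hit A's accidental parse of '-' as a
-- variable name, a corner outside the clause language this solver is written for)
def goodTok (t : String) : Bool :=
  match t.toList with
  | [] => false
  | c :: rest =>
    if c = '-' then match rest with | [] => false | c2 :: _ => c2 != '-'
    else true

-- Pre_ excludes KB whose clauses contain a whitespace-separated token '-' (on which A
-- raises IndexError as soon as two clauses are present) or a token beginning with '--',
-- on which A's treatment of '-' as a variable name is an accident of its parsing.
def Pre_solveKB (KB : List String) : Prop :=
  ∀ c ∈ KB, ∀ t ∈ PySem.Str.split₀ c, goodTok t = true
instance (KB : List String) : Decidable (Pre_solveKB KB) := by unfold Pre_solveKB; infer_instance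

def pvWitness_solveKB : List String := ["a -b", "-a c", "b"]

def Spec_solveKB (KB : List String) (out : Bool × Bool × Int × List String × List String) : Prop := out = solveKB_alt KB
instance (KB : List String) (out : Bool × Bool × Int × List String × List String) : Decidable (Spec_solveKB KB out) := by unfold Spec_solveKB; infer_instance

-- ===== CLAIM (what is proved, stated in full; the proofs are below) =====
def Claim_equal_solveKB : Prop := ∀ (KB : List String), Dom_solveKB KB → Pre_solveKB KB → Spec_solveKB KB (solveKB KB)

-- ===== LEMMAS AND PROOFS =====

-- ---- middle model of the cancellation pass (used only by the proofs) ----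

-- number of tokens of s with literal key κ
def cntK (s : List String) (κ : Char × Bool) : Nat := (s.map tkey).count κ

-- per-variable number of cancelled pairs
def minsV (s : List String) (v : Char) : Nat := min (cntK s (v, false)) (cntK s (v, true))

def budget0 (s : List String) : Char × Bool → Nat := fun κ => minsV s κ.1

-- drop, per key, the first b κ tokens; keep the rest
def dropB : List String → (Char × Bool → Nat) → List String
  | [], _ => []
  | t :: ts, b =>
    if b (tkey t) = 0 then t :: dropB ts b
    else dropB ts (Function.update b (tkey t) (b (tkey t) - 1))

-- the budget left after consuming a list
def resB : List String → (Char × Bool → Nat) → Char × Bool → Nat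
  | [], b => b
  | t :: ts, b =>
    if b (tkey t) = 0 then resB ts b
    else resB ts (Function.update b (tkey t) (b (tkey t) - 1))

-- total number of cancelled pairs
def totalN (s : List String) : Nat := ∑ v ∈ ((s.map tkey).map Prod.fst).toFinset, minsV s v

theorem dropB_append (u v : List String) (b : Char × Bool → Nat) :
    dropB (u ++ v) b = dropB u b ++ dropB v (resB u b) := by
  induction u generalizing b with
  | nil => simp [dropB, resB]
  | cons t ts ih =>
    by_cases h : b (tkey t) = 0 <;> simp [dropB, resB, h, ih]

theorem resB_not_mem {l : List String} {b : Char × Bool → Nat} {κ : Char × Bool}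
    (h : ∀ t ∈ l, tkey t ≠ κ) : resB l b κ = b κ := by
  induction l generalizing b with
  | nil => rfl
  | cons t ts ih =>
    have ht : tkey t ≠ κ := h t (by simp)
    have hts : ∀ t' ∈ ts, tkey t' ≠ κ := fun t' h' => h t' (by simp [h'])
    by_cases h0 : b (tkey t) = 0
    · simp [resB, h0, ih hts]
    · rw [resB, if_neg h0, ih (fun t' h' => h t' (by simp [h'])), Function.update_of_ne (Ne.symm ht)]

theorem dropB_congr {l : List String} {b b' : Char × Bool → Nat}
    (h : ∀ t ∈ l, b (tkey t) = b' (tkey t)) : dropB l b = dropB l b' := by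
  induction l generalizing b b' with
  | nil => rfl
  | cons t ts ih =>
    have ht := h t (by simp)
    have hts : ∀ t' ∈ ts, b (tkey t') = b' (tkey t') := fun t' h' => h t' (by simp [h'])
    by_cases h0 : b (tkey t) = 0
    · rw [dropB, dropB, if_pos h0, if_pos (ht ▸ h0), ih hts]
    · rw [dropB, dropB, if_neg h0, if_neg (ht ▸ h0)]
      apply ih
      intro t' h'
      by_cases he : tkey t' = tkey t
      · rw [he, Function.update_self, Function.update_self, ht]
      · rw [Function.update_of_ne he, Function.update_of_ne he, hts t' h']

theorem resB_congr {l : List String} {b b' : Char × Bool → Nat}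
    (h : ∀ t ∈ l, b (tkey t) = b' (tkey t)) :
    ∀ κ, (b κ = b' κ ∨ κ ∈ l.map tkey) → resB l b κ = resB l b' κ := by
  induction l generalizing b b' with
  | nil =>
    intro κ hκ
    rcases hκ with hκ | hκ
    · exact hκ
    · simp at hκ
  | cons t ts ih =>
    intro κ hκ
    have ht := h t (by simp)
    have hts : ∀ t' ∈ ts, b (tkey t') = b' (tkey t') := fun t' h' => h t' (by simp [h'])
    by_cases h0 : b (tkey t) = 0
    · rw [resB, resB, if_pos h0, if_pos (ht ▸ h0)]
      apply ih hts
      rcases hκ with hκ | hκ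
      · exact Or.inl hκ
      · simp only [List.map_cons, List.mem_cons] at hκ
        rcases hκ with hκ | hκ
        · exact Or.inl (hκ ▸ ht)
        · exact Or.inr hκ
    · rw [resB, resB, if_neg h0, if_neg (ht ▸ h0)]
      have hpt : ∀ t' ∈ ts, Function.update b (tkey t) (b (tkey t) - 1) (tkey t') =
          Function.update b' (tkey t) (b' (tkey t) - 1) (tkey t') := by
        intro t' h'
        by_cases he : tkey t' = tkey t
        · rw [he, Function.update_self, Function.update_self, ht]
        · rw [Function.update_of_ne he, Function.update_of_ne he, hts t' h']
      apply ih hpt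
      rcases hκ with hκ | hκ
      · by_cases he : κ = tkey t
        · subst he; left; rw [Function.update_self, Function.update_self, ht]
        · left; rw [Function.update_of_ne he, Function.update_of_ne he, hκ]
      · simp only [List.map_cons, List.mem_cons] at hκ
        rcases hκ with hκ | hκ
        · subst hκ; left; rw [Function.update_self, Function.update_self, ht]
        · exact Or.inr hκ

theorem dropB_zero {l : List String} {b : Char × Bool → Nat}
    (h : ∀ t ∈ l, b (tkey t) = 0) : dropB l b = l := by
  induction l with
  | nil => rfl
  | cons t ts ih =>
    rw [dropB, if_pos (h t (by simp))]
    rw [ih (fun t' h' => h t' (by simp [h']))]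

-- checkLiteralOpposite on good tokens is: same variable, opposite sign
theorem opp_iff {a b : String} (ha : goodTok a = true) (hb : goodTok b = true) :
    checkLiteralOpposite a b = true ↔ ((tkey a).1 = (tkey b).1 ∧ (tkey a).2 = !(tkey b).2) := by
  unfold goodTok at ha hb
  unfold checkLiteralOpposite tkey
  cases hA : a.toList with
  | nil => rw [hA] at ha; simp at ha
  | cons c r =>
    cases hB : b.toList with
    | nil => rw [hB] at hb; simp at hb
    | cons e q =>
      rw [hA] at ha
      rw [hB] at hb
      by_cases hc : c = '-'
      · subst hc
        cases r with
        | nil => simp at ha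
        | cons c2 r' =>
          have hc2 : c2 ≠ '-' := by simpa using ha
          by_cases he : e = '-'
          · subst he
            cases q with
            | nil => simp at hb
            | cons e2 q' =>
              have he2 : e2 ≠ '-' := by simpa using hb
              simp [hc2, he2]
          · cases q with
            | nil => simp [beq_iff_eq]
            | cons e2 q' => simp [he, beq_iff_eq]
      · by_cases he : e = '-'
        · subst he
          cases q with
          | nil => simp at hb
          | cons e2 q' =>
            have he2 : e2 ≠ '-' := by simpa using hb
            cases r with
            | nil =>
              simp [beq_iff_eq]
              exact comm
            | cons c2 r' =>
              simp [hc, beq_iff_eq]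
              exact comm
        · cases r with
          | nil =>
            cases q with
            | nil => simp [hc, he]
            | cons e2 q' => simp [hc, he]
          | cons c2 r' =>
            cases q with
            | nil => simp [hc, he]
            | cons e2 q' => simp [hc, he]

theorem cntK_decomp (u w r : List String) (x y : String) (κ : Char × Bool) :
    cntK (u ++ x :: (w ++ y :: r)) κ =
      cntK (u ++ (w ++ r)) κ + (if tkey x = κ then 1 else 0) + (if tkey y = κ then 1 else 0) := by
  simp only [cntK, List.map_append, List.map_cons, List.count_append, List.count_cons, beq_iff_eq]
  split_ifs <;> omega

theorem minsV_decomp {v : Char} {σ : Bool} (u w r : List String) (x y : String)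
    (hx : tkey x = (v, σ)) (hy : tkey y = (v, !σ)) (vv : Char) :
    minsV (u ++ x :: (w ++ y :: r)) vv = minsV (u ++ (w ++ r)) vv + (if vv = v then 1 else 0) := by
  have h1 := cntK_decomp u w r x y (vv, false)
  have h2 := cntK_decomp u w r x y (vv, true)
  by_cases hv : vv = v
  · subst hv
    simp only [minsV, Nat.min_def]
    cases σ <;> simp [hx, hy] at h1 h2 <;> split_ifs <;> omega
  · simp only [minsV, Nat.min_def]
    simp only [hx, hy, Prod.mk.injEq, Ne.symm hv, false_and, if_false] at h1 h2
    split_ifs <;> omega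

theorem totalN_decomp {v : Char} {σ : Bool} (u w r : List String) (x y : String)
    (hx : tkey x = (v, σ)) (hy : tkey y = (v, !σ)) :
    totalN (u ++ x :: (w ++ y :: r)) = totalN (u ++ (w ++ r)) + 1 := by
  set s := u ++ x :: (w ++ y :: r) with hs
  set s' := u ++ (w ++ r) with hs'
  have hmem : v ∈ ((s.map tkey).map Prod.fst).toFinset := by
    apply List.mem_toFinset.mpr
    have hxs : x ∈ s := by simp [hs]
    have : tkey x ∈ s.map tkey := List.mem_map_of_mem hxs
    have := List.mem_map_of_mem (f := Prod.fst) this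
    rwa [hx] at this
  have hsub : ((s'.map tkey).map Prod.fst).toFinset ⊆ ((s.map tkey).map Prod.fst).toFinset := by
    intro vv hvv
    apply List.mem_toFinset.mpr
    obtain ⟨κ, hκ, hκ2⟩ := List.mem_map.mp (List.mem_toFinset.mp hvv)
    obtain ⟨t, ht, ht2⟩ := List.mem_map.mp hκ
    have hts : t ∈ s := by
      simp only [hs', List.mem_append] at ht
      simp only [hs, List.mem_append, List.mem_cons]
      tauto
    exact List.mem_map.mpr ⟨κ, List.mem_map.mpr ⟨t, hts, ht2⟩, hκ2⟩
  have hzero : ∀ vv ∈ ((s.map tkey).map Prod.fst).toFinset,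
      vv ∉ ((s'.map tkey).map Prod.fst).toFinset → minsV s' vv = 0 := by
    intro vv _ hnot
    have : (vv, false) ∉ s'.map tkey := by
      intro hm
      exact hnot (List.mem_toFinset.mpr (List.mem_map.mpr ⟨(vv, false), hm, rfl⟩))
    have hc : cntK s' (vv, false) = 0 := List.count_eq_zero.mpr this
    simp [minsV, hc]
  calc totalN s = ∑ vv ∈ ((s.map tkey).map Prod.fst).toFinset,
        (minsV s' vv + if vv = v then 1 else 0) :=
        Finset.sum_congr rfl (fun vv _ => minsV_decomp u w r x y hx hy vv)
    _ = (∑ vv ∈ ((s.map tkey).map Prod.fst).toFinset, minsV s' vv) +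
        ∑ vv ∈ ((s.map tkey).map Prod.fst).toFinset, (if vv = v then 1 else 0) :=
        Finset.sum_add_distrib
    _ = totalN s' + 1 := by
        rw [Finset.sum_ite_eq' _ v (fun _ => 1), if_pos hmem]
        rw [← Finset.sum_subset hsub hzero]
        rfl

theorem dropB_decomp {v : Char} {σ : Bool} (u w r : List String) (x y : String)
    (hx : tkey x = (v, σ)) (hy : tkey y = (v, !σ))
    (hu : ∀ t ∈ u, tkey t ≠ (v, σ) ∧ tkey t ≠ (v, !σ)) (hw : ∀ t ∈ w, tkey t ≠ (v, !σ)) :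
    dropB (u ++ x :: (w ++ y :: r)) (budget0 (u ++ x :: (w ++ y :: r))) =
      dropB (u ++ (w ++ r)) (budget0 (u ++ (w ++ r))) := by
  have hne1 : ((v, !σ) : Char × Bool) ≠ (v, σ) := by simp
  have hne2 : ((v, σ) : Char × Bool) ≠ (v, !σ) := by simp
  have hmins := minsV_decomp u w r x y hx hy
  set s := u ++ x :: (w ++ y :: r) with hs
  set s' := u ++ (w ++ r) with hs'
  set b0 := budget0 s with hb0
  set b0' := budget0 s' with hb0'
  have hb1 : b0 (v, σ) = b0' (v, σ) + 1 := by simp [hb0, hb0', budget0, hmins]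
  have hb2v : b0 (v, !σ) = b0' (v, !σ) + 1 := by simp [hb0, hb0', budget0, hmins]
  have hbo : ∀ κ : Char × Bool, κ ≠ (v, σ) → κ ≠ (v, !σ) → b0 κ = b0' κ := by
    rintro ⟨kv, kb⟩ h1 h2
    by_cases hkv : kv = v
    · subst hkv
      exfalso
      cases kb <;> cases σ <;> simp_all
    · simp [hb0, hb0', budget0, hmins, hkv]
  have hu1 : ∀ t ∈ u, tkey t ≠ (v, σ) := fun t ht => (hu t ht).1
  have hu2 : ∀ t ∈ u, tkey t ≠ (v, !σ) := fun t ht => (hu t ht).2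
  have hbu : ∀ t ∈ u, b0 (tkey t) = b0' (tkey t) :=
    fun t ht => hbo _ (hu1 t ht) (hu2 t ht)
  set b1 := resB u b0 with hb1def
  set b2 := Function.update b1 (v, σ) (b1 (v, σ) - 1) with hb2def
  set b3 := resB w b2 with hb3def
  set b4 := Function.update b3 (v, !σ) (b3 (v, !σ) - 1) with hb4def
  set c1 := resB u b0' with hc1def
  have hb1x : b1 (v, σ) = b0 (v, σ) := resB_not_mem hu1
  have hb1y : b1 (v, !σ) = b0 (v, !σ) := resB_not_mem hu2
  have hx0 : ¬ b1 (tkey x) = 0 := by rw [hx, hb1x, hb1]; omega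
  have hb3y : b3 (v, !σ) = b0 (v, !σ) := by
    rw [hb3def, resB_not_mem hw, hb2def, Function.update_of_ne hne1, hb1y]
  have hy0 : ¬ b3 (tkey y) = 0 := by rw [hy, hb3y, hb2v]; omega
  -- pointwise agreement of the residual budgets on w, and after w
  have hw2 : ∀ t ∈ w, b2 (tkey t) = c1 (tkey t) := by
    intro t ht
    by_cases hk : tkey t = (v, σ)
    · rw [hk, hb2def, Function.update_self, hb1x, hb1, hc1def, resB_not_mem hu1]
      omega
    · have hk2 : tkey t ≠ (v, !σ) := hw t ht
      rw [hb2def, Function.update_of_ne hk, hb1def, hc1def]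
      exact resB_congr hbu _ (Or.inl (hbo _ hk hk2))
  have hb2c1 : ∀ κ : Char × Bool, κ ≠ (v, !σ) → b2 κ = c1 κ := by
    intro κ hκ
    by_cases hk : κ = (v, σ)
    · subst hk
      rw [hb2def, Function.update_self, hb1x, hb1, hc1def, resB_not_mem hu1]
      omega
    · rw [hb2def, Function.update_of_ne hk, hb1def, hc1def]
      exact resB_congr hbu _ (Or.inl (hbo _ hk hκ))
  have hb4eq : ∀ κ : Char × Bool, b4 κ = resB w c1 κ := by
    intro κ
    by_cases hκ : κ = (v, !σ)
    · subst hκ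
      rw [hb4def, Function.update_self, hb3y, hb2v, resB_not_mem hw, hc1def, resB_not_mem hu2]
      omega
    · rw [hb4def, Function.update_of_ne hκ, hb3def]
      by_cases hmem : κ ∈ w.map tkey
      · exact resB_congr hw2 _ (Or.inr hmem)
      · have hnw : ∀ t ∈ w, tkey t ≠ κ := by
          intro t ht he
          exact hmem (List.mem_map.mpr ⟨t, ht, he⟩)
        rw [resB_not_mem hnw, resB_not_mem hnw]
        exact hb2c1 _ hκ
  -- assemble both sides
  have lhs1 : dropB (x :: (w ++ y :: r)) b1 = dropB (w ++ y :: r) b2 := by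
    rw [dropB, if_neg hx0, hx]
  have lhs2 : dropB (y :: r) b3 = dropB r b4 := by
    rw [dropB, if_neg hy0, hy]
  calc dropB s b0 = dropB u b0 ++ dropB (x :: (w ++ y :: r)) b1 := by
        rw [hs, dropB_append, hb1def]
    _ = dropB u b0 ++ (dropB w b2 ++ dropB (y :: r) b3) := by
        rw [lhs1, dropB_append, hb3def]
    _ = dropB u b0' ++ (dropB w c1 ++ dropB r (resB w c1)) := by
        rw [dropB_congr hbu, dropB_congr hw2, lhs2, dropB_congr (fun t _ => hb4eq (tkey t))]
    _ = dropB s' b0' := by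
        rw [hs', dropB_append, dropB_append]

theorem findFirst_none {p : String → Bool} {l : List String}
    (h : findFirst p l = none) : ∀ t ∈ l, p t = false := by
  induction l with
  | nil => simp
  | cons t ts ih =>
    by_cases hp : p t
    · simp [findFirst, hp] at h
    · simp only [findFirst, if_neg hp, Option.map_eq_none_iff] at h
      intro t' ht'
      rcases List.mem_cons.mp ht' with rfl | ht'
      · exact Bool.eq_false_iff.mpr hp
      · exact ih h t' ht'

theorem findFirst_spec {p : String → Bool} {l : List String} {d : Nat}
    (h : findFirst p l = some d) :
    ∀ (hd : d < l.length), p l[d] = true ∧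
      ∀ (e : Nat) (hel : e < l.length), e < d → p l[e] = false := by
  induction l generalizing d with
  | nil => simp [findFirst] at h
  | cons t ts ih =>
    intro hd
    by_cases hp : p t
    · rw [findFirst, if_pos hp] at h
      obtain rfl : (0 : Nat) = d := Option.some.inj h
      exact ⟨hp, fun e hel he => absurd he (by omega)⟩
    · rw [findFirst, if_neg hp] at h
      cases hfd : findFirst p ts with
      | none => rw [hfd] at h; simp at h
      | some d' =>
        rw [hfd, Option.map_some] at h
        obtain rfl : d' + 1 = d := Option.some.inj h
        have hd' : d' < ts.length := findFirst_some_lt hfd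
        obtain ⟨h1, h2⟩ := ih hfd hd'
        refine ⟨by simpa using h1, ?_⟩
        intro e hel he
        cases e with
        | zero => simpa using Bool.eq_false_iff.mpr hp
        | succ e' =>
          have : e' < ts.length := by simp at hel; omega
          simpa using h2 e' this (by omega)

theorem cancelLoop_of_ge {s : List String} {k cnt : Nat} (hk : ¬ k < s.length) :
    cancelLoop s k cnt = (s, cnt) := by
  rw [cancelLoop, dif_neg hk]

theorem cancelLoop_of_none {s : List String} {k cnt : Nat} (hk : k < s.length)
    (h : findFirst (fun t => checkLiteralOpposite s[k] t) (s.drop (k + 1)) = none) :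
    cancelLoop s k cnt = cancelLoop s (k + 1) cnt := by
  rw [cancelLoop, dif_pos hk]
  split
  · rename_i d hf
    rw [h] at hf
    exact absurd hf (by simp)
  · rfl

theorem cancelLoop_of_some {s : List String} {k cnt d : Nat} (hk : k < s.length)
    (h : findFirst (fun t => checkLiteralOpposite s[k] t) (s.drop (k + 1)) = some d) :
    cancelLoop s k cnt = cancelLoop ((s.eraseIdx (k + 1 + d)).eraseIdx k) 0 (cnt + 1) := by
  rw [cancelLoop, dif_pos hk]
  split
  · rename_i d' hf
    rw [h] at hf
    obtain rfl : d = d' := Option.some.inj hf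
    rfl
  · rename_i hf
    rw [h] at hf
    exact absurd hf (by simp)

theorem cdLoop_of_ge {z : List String} {i : Nat} (hi : ¬ i < z.length) :
    cdLoop z i = z := by
  rw [cdLoop, dif_neg hi]

theorem cdLoop_of_none {z : List String} {i : Nat} (hi : i < z.length)
    (h : findFirst (fun t => z[i] == t) (z.drop (i + 1)) = none) :
    cdLoop z i = cdLoop z (i + 1) := by
  rw [cdLoop, dif_pos hi]
  split
  · rename_i d hf
    rw [h] at hf
    exact absurd hf (by simp)
  · rfl

theorem cdLoop_of_some {z : List String} {i d : Nat} (hi : i < z.length)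
    (h : findFirst (fun t => z[i] == t) (z.drop (i + 1)) = some d) :
    cdLoop z i = cdLoop (z.eraseIdx (i + 1 + d)) 0 := by
  rw [cdLoop, dif_pos hi]
  split
  · rename_i d' hf
    rw [h] at hf
    obtain rfl : d = d' := Option.some.inj hf
    rfl
  · rename_i hf
    rw [h] at hf
    exact absurd hf (by simp)

-- with no opposite pair anywhere, nothing is cancelled
theorem minsV_zero_of_nopair {s : List String} (hg : ∀ t ∈ s, goodTok t = true)
    (h : ∀ (p q : Nat) (hp : p < s.length) (hq : q < s.length), p < q →
        checkLiteralOpposite s[p] s[q] = false) :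
    ∀ vv, minsV s vv = 0 := by
  intro vv
  by_contra hne
  have h1 : 0 < cntK s (vv, false) := by
    simp only [minsV] at hne; omega
  have h2 : 0 < cntK s (vv, true) := by
    simp only [minsV] at hne; omega
  obtain ⟨t1, ht1, hk1⟩ := List.mem_map.mp (List.count_pos_iff.mp h1)
  obtain ⟨t2, ht2, hk2⟩ := List.mem_map.mp (List.count_pos_iff.mp h2)
  obtain ⟨i, hi, rfl⟩ := List.mem_iff_getElem.mp ht1
  obtain ⟨j, hj, rfl⟩ := List.mem_iff_getElem.mp ht2
  have hij : i ≠ j := by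
    intro he
    subst he
    rw [hk1] at hk2
    simp at hk2
  rcases Nat.lt_or_ge i j with hlt | hge
  · have : checkLiteralOpposite s[i] s[j] = true := by
      rw [opp_iff (hg _ (List.getElem_mem hi)) (hg _ (List.getElem_mem hj))]
      rw [hk1, hk2]
      simp
    rw [h i j hi hj hlt] at this
    exact absurd this (by simp)
  · have hlt : j < i := by omega
    have : checkLiteralOpposite s[j] s[i] = true := by
      rw [opp_iff (hg _ (List.getElem_mem hj)) (hg _ (List.getElem_mem hi))]
      rw [hk1, hk2]
      simp
    rw [h j i hj hi hlt] at this
    exact absurd this (by simp)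

theorem cancel_done {s : List String} {c : Nat} (hg : ∀ t ∈ s, goodTok t = true)
    (h : ∀ (p q : Nat) (hp : p < s.length) (hq : q < s.length), p < q →
        checkLiteralOpposite s[p] s[q] = false) :
    (s, c) = (dropB s (budget0 s), c + totalN s) := by
  have hz := minsV_zero_of_nopair hg h
  have hd : dropB s (budget0 s) = s := dropB_zero (fun t _ => hz (tkey t).1)
  have ht : totalN s = 0 := Finset.sum_eq_zero (fun vv _ => hz vv)
  rw [hd, ht]
  simp

theorem erase_two (u w r : List String) (x y : String) :
    ((u ++ x :: (w ++ y :: r)).eraseIdx (u.length + 1 + w.length)).eraseIdx u.length =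
      u ++ (w ++ r) := by
  have h1 : u ++ x :: (w ++ y :: r) = (u ++ x :: w) ++ (y :: r) := by simp
  have h2 : (u ++ x :: w).length ≤ u.length + 1 + w.length := by simp; omega
  rw [h1, List.eraseIdx_append_of_length_le h2]
  have h3 : u.length + 1 + w.length - (u ++ x :: w).length = 0 := by simp; omega
  rw [h3]
  have h4 : (u ++ x :: w) ++ (y :: r).eraseIdx 0 = u ++ (x :: (w ++ r)) := by simp
  rw [h4, List.eraseIdx_append_of_length_le (Nat.le_refl u.length), Nat.sub_self]
  simp

theorem cancel_main (L : Nat) : ∀ (s : List String), s.length ≤ L →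
    (∀ t ∈ s, goodTok t = true) → ∀ (d k c : Nat), s.length - k ≤ d →
    (∀ (p q : Nat) (hp : p < s.length) (hq : q < s.length), p < k → p < q →
      checkLiteralOpposite s[p] s[q] = false) →
    cancelLoop s k c = (dropB s (budget0 s), c + totalN s) := by
  induction L with
  | zero =>
    intro s hsL hg d k c hd hInv
    have : s = [] := List.eq_nil_of_length_eq_zero (by omega)
    subst this
    rw [cancelLoop_of_ge (by simp)]
    exact cancel_done hg (by intro p q hp; omega)
  | succ L ihL =>
    intro s hsL hg d
    induction d with
    | zero =>
      intro k c hd hInv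
      have hk : ¬ k < s.length := by omega
      rw [cancelLoop_of_ge hk]
      exact cancel_done hg (fun p q hp hq hpq => hInv p q hp hq (by omega) hpq)
    | succ d ihd =>
      intro k c hd hInv
      by_cases hk : k < s.length
      · cases hfind : findFirst (fun t => checkLiteralOpposite s[k] t) (s.drop (k + 1)) with
        | none =>
          rw [cancelLoop_of_none hk hfind]
          apply ihd (k + 1) c (by omega)
          intro p q hp hq hpk hpq
          by_cases hpk' : p < k
          · exact hInv p q hp hq hpk' hpq
          · have hpe : p = k := by omega
            subst hpe
            obtain ⟨e, rfl⟩ : ∃ e, q = p + 1 + e := ⟨q - (p + 1), by omega⟩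
            have hq1 : e < (s.drop (p + 1)).length := by simp; omega
            have hmem : s[p + 1 + e] ∈ s.drop (p + 1) :=
              List.mem_iff_getElem.mpr ⟨e, hq1, List.getElem_drop⟩
            exact findFirst_none hfind _ hmem
        | some dd =>
          rw [cancelLoop_of_some hk hfind]
          have hdrop_len : (s.drop (k + 1)).length = s.length - (k + 1) := by simp
          have hddl := findFirst_some_lt hfind
          have hm : k + 1 + dd < s.length := by omega
          obtain ⟨hopp0, hmin0⟩ := findFirst_spec hfind hddl
          have hdd_get : (s.drop (k + 1))[dd] = s[k + 1 + dd] := List.getElem_drop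
          have hopp : checkLiteralOpposite s[k] s[k + 1 + dd] = true := by
            rw [← hdd_get]; exact hopp0
          have hmin : ∀ (q : Nat) (hq : q < s.length), k < q → q < k + 1 + dd →
              checkLiteralOpposite s[k] s[q] = false := by
            intro q hq h1 h2
            obtain ⟨e, rfl⟩ : ∃ e, q = k + 1 + e := ⟨q - (k + 1), by omega⟩
            have he : e < (s.drop (k + 1)).length := by simp; omega
            have hf := hmin0 e he (by omega)
            rw [List.getElem_drop] at hf
            simpa using hf
          set x := s[k] with hxdef
          set y := s[k + 1 + dd] with hydef
          set u := s.take k with hudef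
          set w := (s.drop (k + 1)).take dd with hwdef
          set r := s.drop (k + 1 + dd + 1) with hrdef
          have hulen : u.length = k := by rw [hudef]; simp; omega
          have hwlen : w.length = dd := by rw [hwdef]; simp; omega
          have hdecomp : s = u ++ x :: (w ++ y :: r) := by
            have h3 : s.drop k = x :: s.drop (k + 1) := by
              rw [hxdef]
              exact List.drop_eq_getElem_cons hk
            have h1 : s.drop (k + 1 + dd) = y :: r := by
              rw [hydef, hrdef]
              exact List.drop_eq_getElem_cons hm
            have h2 : s.drop (k + 1) = w ++ s.drop (k + 1 + dd) := by
              rw [hwdef]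
              conv_lhs => rw [← List.take_append_drop dd (s.drop (k + 1))]
              rw [List.drop_drop]
            conv_lhs => rw [← List.take_append_drop k s]
            rw [h3, h2, h1, ← hudef]
          have hgx : goodTok x = true := by
            rw [hxdef]
            exact hg _ (List.getElem_mem hk)
          have hgy : goodTok y = true := by
            rw [hydef]
            exact hg _ (List.getElem_mem hm)
          obtain ⟨hfst, hsnd⟩ := (opp_iff hgx hgy).mp hopp
          have hy2 : tkey y = ((tkey x).1, !(tkey x).2) := by
            have h2 : (tkey y).2 = !(tkey x).2 := by
              cases hby : (tkey y).2 <;> cases hbx0 : (tkey x).2 <;>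
                rw [hby, hbx0] at hsnd <;> simp at hsnd ⊢
            rw [hfst, ← h2]
          have hx2 : tkey x = ((tkey x).1, (tkey x).2) := rfl
          have hu : ∀ t ∈ u, tkey t ≠ ((tkey x).1, (tkey x).2) ∧
              tkey t ≠ ((tkey x).1, !(tkey x).2) := by
            intro t ht
            rw [hudef] at ht
            obtain ⟨p, hpu, rfl⟩ := List.mem_iff_getElem.mp ht
            have hpk : p < k := by simp at hpu; omega
            have hps : p < s.length := by omega
            have hpget : (s.take k)[p] = s[p] := List.getElem_take
            have hgt : goodTok (s.take k)[p] = true := by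
              rw [hpget]
              exact hg _ (List.getElem_mem hps)
            constructor
            · intro hkey
              have hc : checkLiteralOpposite (s.take k)[p] y = true := by
                rw [opp_iff hgt hgy, hkey, hy2]
                simp
              rw [hpget, hydef] at hc
              rw [hInv p (k + 1 + dd) hps hm hpk (by omega)] at hc
              simp at hc
            · intro hkey
              have hc : checkLiteralOpposite (s.take k)[p] x = true := by
                rw [opp_iff hgt hgx, hkey]
                simp
              rw [hpget, hxdef] at hc
              rw [hInv p k hps hk hpk hpk] at hc
              simp at hc
          have hw : ∀ t ∈ w, tkey t ≠ ((tkey x).1, !(tkey x).2) := by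
            intro t ht hkey
            rw [hwdef] at ht
            obtain ⟨e, heu, rfl⟩ := List.mem_iff_getElem.mp ht
            have hew : e < dd := by simp at heu; omega
            have he1 : e < (s.drop (k + 1)).length := by omega
            have hes : k + 1 + e < s.length := by omega
            have h1 : ((s.drop (k + 1)).take dd)[e] = (s.drop (k + 1))[e] := List.getElem_take
            have h2 : (s.drop (k + 1))[e] = s[k + 1 + e] := List.getElem_drop
            have hgt : goodTok ((s.drop (k + 1)).take dd)[e] = true := by
              rw [h1, h2]
              exact hg _ (List.getElem_mem hes)
            have hc : checkLiteralOpposite x ((s.drop (k + 1)).take dd)[e] = true := by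
              rw [opp_iff hgx hgt, hkey]
              simp
            rw [h1, h2, hxdef] at hc
            rw [hmin (k + 1 + e) hes (by omega) (by omega)] at hc
            simp at hc
          have hslen : s.length = u.length + 1 + (w.length + 1 + r.length) := by
            conv_lhs => rw [hdecomp]
            simp
            omega
          have hlen' : (u ++ (w ++ r)).length ≤ L := by
            simp
            omega
          have hg' : ∀ t ∈ u ++ (w ++ r), goodTok t = true := by
            intro t ht
            apply hg
            rw [hdecomp]
            simp at ht ⊢
            tauto
          have herase : (s.eraseIdx (k + 1 + dd)).eraseIdx k = u ++ (w ++ r) := by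
            conv_lhs => rw [hdecomp]
            have e1 : k + 1 + dd = u.length + 1 + w.length := by omega
            rw [e1, show k = u.length from hulen.symm]
            exact erase_two u w r x y
          rw [herase]
          rw [ihL (u ++ (w ++ r)) hlen' hg' (u ++ (w ++ r)).length 0 (c + 1) (by omega)
              (by intro p q hp hq hpk hpq; omega)]
          have htot := totalN_decomp u w r x y hx2 hy2
          have hdrop := dropB_decomp u w r x y hx2 hy2 hu hw
          conv_rhs => rw [hdecomp]
          rw [hdrop, htot]
          exact Prod.ext rfl (by omega)
      · rw [cancelLoop_of_ge hk]
        exact cancel_done hg (fun p q hp hq hpq => hInv p q hp hq (by omega) hpq)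

-- ---- checkDuplicate is ordered dedup (first occurrences kept) ----

theorem set_add_of_mem {s : PySem.Set String} {x : String} (h : x ∈ s) :
    PySem.Set.add s x = s := by
  simp [PySem.Set.add, PySem.Set.contains, h]

theorem set_add_of_not_mem {s : PySem.Set String} {x : String} (h : ¬ x ∈ s) :
    PySem.Set.add s x = s ++ [x] := by
  simp [PySem.Set.add, PySem.Set.contains, h]

theorem dedup_middle_erase (a b : List String) (x : String) (hx : x ∈ a) :
    PySem.List.dedup (a ++ x :: b) = PySem.List.dedup (a ++ b) := by
  rw [PySem.List.dedup_eq_ofList, PySem.List.dedup_eq_ofList,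
      PySem.Set.ofList_eq_foldl, PySem.Set.ofList_eq_foldl,
      List.foldl_append, List.foldl_append, List.foldl_cons]
  congr 1
  apply set_add_of_mem
  rw [← PySem.Set.ofList_eq_foldl]
  exact (PySem.Set.mem_ofList a x).mpr hx

theorem foldl_add_of_nodup : ∀ (l : List String) (S : PySem.Set String), l.Nodup →
    (∀ t ∈ l, ¬ t ∈ S) → List.foldl PySem.Set.add S l = S ++ l := by
  intro l
  induction l with
  | nil => intro S _ _; simp
  | cons t ts ih =>
    intro S hnd hdis
    rw [List.foldl_cons, set_add_of_not_mem (hdis t (by simp))]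
    rw [ih (S ++ [t]) (List.Nodup.of_cons hnd)]
    · simp
    · intro t' ht'
      simp only [List.mem_append, List.mem_singleton]
      rintro (h | rfl)
      · exact hdis t' (by simp [ht']) h
      · exact (List.nodup_cons.mp hnd).1 ht'

theorem dedup_of_nodup {l : List String} (h : l.Nodup) : PySem.List.dedup l = l := by
  rw [PySem.List.dedup_eq_ofList, PySem.Set.ofList_eq_foldl]
  have := foldl_add_of_nodup l [] h (by simp)
  simpa using this

theorem cd_main (L : Nat) : ∀ (z : List String), z.length ≤ L →
    ∀ (d i : Nat), z.length - i ≤ d →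
    (∀ (p q : Nat) (hp : p < z.length) (hq : q < z.length), p < i → p < q →
      (z[p] == z[q]) = false) →
    cdLoop z i = PySem.List.dedup z := by
  induction L with
  | zero =>
    intro z hzL d i hd hInv
    have : z = [] := List.eq_nil_of_length_eq_zero (by omega)
    subst this
    rw [cdLoop_of_ge (by simp)]
    rfl
  | succ L ihL =>
    intro z hzL d
    induction d with
    | zero =>
      intro i hd hInv
      have hi : ¬ i < z.length := by omega
      rw [cdLoop_of_ge hi]
      rw [dedup_of_nodup]
      rw [List.nodup_iff_getElem?_ne_getElem?]
      intro p q hpq hq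
      have hp : p < z.length := by omega
      rw [List.getElem?_eq_getElem hp, List.getElem?_eq_getElem hq]
      have := hInv p q hp hq (by omega) hpq
      simpa using this
    | succ d ihd =>
      intro i hd hInv
      by_cases hi : i < z.length
      · cases hfind : findFirst (fun t => z[i] == t) (z.drop (i + 1)) with
        | none =>
          rw [cdLoop_of_none hi hfind]
          apply ihd (i + 1) (by omega)
          intro p q hp hq hpk hpq
          by_cases hpk' : p < i
          · exact hInv p q hp hq hpk' hpq
          · have hpe : p = i := by omega
            subst hpe
            obtain ⟨e, rfl⟩ : ∃ e, q = p + 1 + e := ⟨q - (p + 1), by omega⟩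
            have hq1 : e < (z.drop (p + 1)).length := by simp; omega
            have hmem : z[p + 1 + e] ∈ z.drop (p + 1) :=
              List.mem_iff_getElem.mpr ⟨e, hq1, List.getElem_drop⟩
            exact findFirst_none hfind _ hmem
        | some dd =>
          rw [cdLoop_of_some hi hfind]
          have hddl := findFirst_some_lt hfind
          have hm : i + 1 + dd < z.length := by simp at hddl; omega
          obtain ⟨heq0, _⟩ := findFirst_spec hfind hddl
          have hdd_get : (z.drop (i + 1))[dd] = z[i + 1 + dd] := List.getElem_drop
          have heq : z[i + 1 + dd] = z[i] := by
            rw [← hdd_get]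
            exact (beq_iff_eq.mp heq0).symm
          have hdecomp : z.eraseIdx (i + 1 + dd) = z.take (i + 1 + dd) ++ z.drop (i + 1 + dd + 1) :=
            List.eraseIdx_eq_take_drop_succ z (i + 1 + dd)
          have hzdec : z = z.take (i + 1 + dd) ++ z[i + 1 + dd] :: z.drop (i + 1 + dd + 1) := by
            conv_lhs => rw [← List.take_append_drop (i + 1 + dd) z]
            rw [List.drop_eq_getElem_cons hm]
          have hxin : z[i + 1 + dd] ∈ z.take (i + 1 + dd) := by
            rw [heq]
            apply List.mem_iff_getElem.mpr
            refine ⟨i, by simp; omega, List.getElem_take⟩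
          have hlen' : (z.eraseIdx (i + 1 + dd)).length ≤ L := by
            rw [List.length_eraseIdx, if_pos hm]
            omega
          rw [ihL (z.eraseIdx (i + 1 + dd)) hlen' (z.eraseIdx (i + 1 + dd)).length 0 (by omega)
              (by intro p q hp hq hpk hpq; omega)]
          rw [hdecomp]
          conv_rhs => rw [hzdec]
          exact (dedup_middle_erase _ _ _ hxin).symm
      · rw [cdLoop_of_ge hi]
        rw [dedup_of_nodup]
        rw [List.nodup_iff_getElem?_ne_getElem?]
        intro p q hpq hq
        have hp : p < z.length := by omega
        rw [List.getElem?_eq_getElem hp, List.getElem?_eq_getElem hq]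
        have := hInv p q hp hq (by omega) hpq
        simpa using this

theorem cd_eq (z : List String) : cdLoop z 0 = PySem.List.dedup z :=
  cd_main z.length z (Nat.le_refl _) z.length 0 (by omega) (by intro p q hp hq hpk; omega)

-- ---- the "cls" building loop is '  '.join ----

theorem toList_inj' {a b : String} (h : a.toList = b.toList) : a = b := by
  have := congrArg String.ofList h
  simpa [String.ofList_toList] using this

theorem clsJoin_eq (l : List String) : clsJoin l = PySem.Str.join "  " l := by
  match l with
  | [] => rfl
  | [x] =>
    show x = PySem.Str.join "  " [x]
    rw [PySem.Str.join]
    simp [PySem.Chars.join_singleton]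
  | x :: y :: rest =>
    show x ++ "  " ++ clsJoin (y :: rest) = _
    rw [clsJoin_eq (y :: rest)]
    rw [PySem.Str.join, PySem.Str.join]
    simp only [List.map_cons, PySem.Chars.join_cons_cons]
    apply toList_inj'
    simp [String.toList_append]

-- ---- B's counting dict is Counter (s.map tkey) ----

theorem cnt_fold_eq (s : List String) :
    s.foldl (fun d t => d.modify (tkey t) 0 (· + 1)) PySem.Dict.empty =
      PySem.Dict.counter (s.map tkey) := by
  rw [PySem.Dict.counter_eq_foldl, List.foldl_map]

-- ---- B's ''count'' equals the middle model's totalN ----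

theorem total_nat (s : List String) :
    ((((PySem.Set.ofList (s.map tkey)).filter (fun κ => !κ.2)).map
        (fun κ => min ((s.map tkey).count κ) ((s.map tkey).count (κ.1, true)))).sum)
      = totalN s := by
  have hnd : ((PySem.Set.ofList (s.map tkey)).filter (fun κ => !κ.2)).Nodup :=
    List.Nodup.filter _ (PySem.Set.nodup_ofList (s.map tkey))
  rw [← List.sum_toFinset _ hnd]
  rw [totalN]
  have hstep : ∑ κ ∈ ((PySem.Set.ofList (s.map tkey)).filter (fun κ => !κ.2)).toFinset,
      min ((s.map tkey).count κ) ((s.map tkey).count (κ.1, true)) =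
      ∑ v ∈ (((s.map tkey).map Prod.fst).toFinset.filter (fun v => (v, false) ∈ s.map tkey)),
        minsV s v := by
    apply Finset.sum_nbij' (i := fun κ => κ.1) (j := fun v => (v, false))
    · intro κ hκ
      rw [List.mem_toFinset, List.mem_filter] at hκ
      obtain ⟨hκ1, hκ2⟩ := hκ
      have hmem : κ ∈ s.map tkey := (PySem.Set.mem_ofList _ _).mp hκ1
      have hκf : κ = (κ.1, false) := by
        rcases κ with ⟨kv, kb⟩
        simp at hκ2
        simp [hκ2]
      rw [Finset.mem_filter, List.mem_toFinset]
      exact ⟨List.mem_map.mpr ⟨κ, hmem, rfl⟩, by rw [← hκf]; exact hmem⟩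
    · intro v hv
      rw [Finset.mem_filter] at hv
      rw [List.mem_toFinset, List.mem_filter]
      exact ⟨(PySem.Set.mem_ofList _ _).mpr hv.2, rfl⟩
    · intro κ hκ
      rw [List.mem_toFinset, List.mem_filter] at hκ
      rcases κ with ⟨kv, kb⟩
      have : kb = false := by simpa using hκ.2
      simp [this]
    · intro v _
      rfl
    · intro κ hκ
      rw [List.mem_toFinset, List.mem_filter] at hκ
      rcases κ with ⟨kv, kb⟩
      have : kb = false := by simpa using hκ.2
      subst this
      rfl
  rw [hstep]
  apply Finset.sum_subset (Finset.filter_subset _ _)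
  intro v hv hnv
  rw [Finset.mem_filter, not_and] at hnv
  have : (v, false) ∉ s.map tkey := fun hm => (hnv hv) hm
  have hc : cntK s (v, false) = 0 := List.count_eq_zero.mpr this
  simp [minsV, hc]

theorem cast_list_sum_min (l : List (Char × Bool)) (K : List (Char × Bool)) :
    (l.map (fun κ => ((min (K.count κ) (K.count (κ.1, true)) : Nat) : Int))).sum =
      ((l.map (fun κ => min (K.count κ) (K.count (κ.1, true)))).sum : Nat) := by
  induction l with
  | nil => simp
  | cons a t ih =>
    simp only [List.map_cons, List.sum_cons, ih]
    push_cast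
    ring

theorem total_eq (s : List String) :
    (((PySem.Dict.counter (s.map tkey)).items.filter (fun kv => !kv.1.2)).map
        (fun kv => min kv.2 ((PySem.Dict.counter (s.map tkey)).getD (kv.1.1, true) 0))).sum
      = (totalN s : Int) := by
  rw [PySem.Dict.items_counter, List.filter_map, List.map_map]
  have hfun : ((fun kv : (Char × Bool) × Int =>
        min kv.2 ((PySem.Dict.counter (s.map tkey)).getD (kv.1.1, true) 0)) ∘
      (fun k : Char × Bool => (k, ((s.map tkey).count k : Int)))) =
      fun κ : Char × Bool => ((min ((s.map tkey).count κ) ((s.map tkey).count (κ.1, true)) : Nat) : Int) := by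
    funext κ
    simp [PySem.Dict.getD_counter, Nat.cast_min]
  rw [hfun]
  have hpred : ((PySem.Set.ofList (s.map tkey)).filter
        (fun κ => ((fun kv : (Char × Bool) × Int => !kv.1.2) ∘
          (fun k : Char × Bool => (k, ((s.map tkey).count k : Int)))) κ)) =
      ((PySem.Set.ofList (s.map tkey)).filter (fun κ => !κ.2)) := by
    rfl
  rw [hpred, cast_list_sum_min, total_nat]

-- ---- B's survivors pass is dropB ----

theorem survFold_gen (M : Char × Bool → Nat) :
    ∀ (l : List String) (seen : PySem.Dict (Char × Bool) Int) (acc : List String)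
      (b : Char × Bool → Nat),
    (∀ κ, ∃ i : Nat, seen.getD κ 0 = (i : Int) ∧ b κ = M κ - i) →
    (l.foldl (fun (st : PySem.Dict (Char × Bool) Int × List String) t =>
        (st.1.insert (tkey t) (st.1.getD (tkey t) 0 + 1),
          if ((M (tkey t) : Int)) ≤ st.1.getD (tkey t) 0 then st.2 ++ [t] else st.2))
      (seen, acc)).2 = acc ++ dropB l b := by
  intro l
  induction l with
  | nil =>
    intro seen acc b _
    simp [dropB]
  | cons t ts ih =>
    intro seen acc b hinv
    obtain ⟨i, hseen, hb⟩ := hinv (tkey t)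
    rw [List.foldl_cons]
    have hinv' : ∀ κ, ∃ j : Nat,
        (seen.insert (tkey t) (seen.getD (tkey t) 0 + 1)).getD κ 0 = (j : Int) ∧
        (if b (tkey t) = 0 then b else Function.update b (tkey t) (b (tkey t) - 1)) κ =
          M κ - j := by
      intro κ
      by_cases hκ : κ = tkey t
      · subst hκ
        refine ⟨i + 1, ?_, ?_⟩
        · rw [PySem.Dict.getD_insert, if_pos rfl, hseen]
          push_cast
          ring
        · by_cases h0 : b (tkey t) = 0
          · rw [if_pos h0, h0]
            omega
          · rw [if_neg h0, Function.update_self]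
            omega
      · obtain ⟨j, h1, h2⟩ := hinv κ
        refine ⟨j, ?_, ?_⟩
        · rw [PySem.Dict.getD_insert, if_neg hκ, h1]
        · by_cases h0 : b (tkey t) = 0
          · rw [if_pos h0]; exact h2
          · rw [if_neg h0, Function.update_of_ne hκ]; exact h2
    by_cases h0 : b (tkey t) = 0
    · have hMi : (M (tkey t) : Int) ≤ seen.getD (tkey t) 0 := by
        rw [hseen]
        exact_mod_cast (by omega : M (tkey t) ≤ i)
      rw [if_pos hMi]
      rw [dropB, if_pos h0]
      have := ih (seen.insert (tkey t) (seen.getD (tkey t) 0 + 1)) (acc ++ [t])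
        b (by simpa [h0] using hinv')
      rw [this]
      simp
    · have hMi : ¬ (M (tkey t) : Int) ≤ seen.getD (tkey t) 0 := by
        rw [hseen]
        have : i < M (tkey t) := by omega
        exact not_le.mpr (by exact_mod_cast this)
      rw [if_neg hMi]
      rw [dropB, if_neg h0]
      exact ih (seen.insert (tkey t) (seen.getD (tkey t) 0 + 1)) acc
        (Function.update b (tkey t) (b (tkey t) - 1)) (by simpa [h0] using hinv')

-- ---- str.split() distributes over concatenation with ' ' in the middle ----

theorem split0_go_acc : ∀ (xs cur : List Char) (acc : List (List Char)),
    PySem.Chars.split₀.go xs cur acc = acc.reverse ++ PySem.Chars.split₀.go xs cur [] := by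
  intro xs
  induction xs with
  | nil =>
    intro cur acc
    simp only [PySem.Chars.split₀.go]
    by_cases hc : cur.isEmpty <;> simp [hc]
  | cons c rest ih =>
    intro cur acc
    simp only [PySem.Chars.split₀.go]
    by_cases hsp : PySem.Chars.isspace c
    · by_cases hc : cur.isEmpty
      · simp only [hsp, hc, if_true]
        rw [ih [] acc]
      · simp only [hsp, hc, if_true, if_false, Bool.false_eq_true]
        rw [ih [] (cur.reverse :: acc), ih [] [cur.reverse]]
        simp
    · simp only [hsp, Bool.false_eq_true, if_false]
      rw [ih (c :: cur) acc]

theorem split0_go_space (ys : List Char) : ∀ (xs cur : List Char) (acc : List (List Char)),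
    PySem.Chars.split₀.go (xs ++ ' ' :: ys) cur acc =
      PySem.Chars.split₀.go xs cur acc ++ PySem.Chars.split₀.go ys [] [] := by
  intro xs
  have hsp : PySem.Chars.isspace ' ' = true := by decide
  induction xs with
  | nil =>
    intro cur acc
    simp only [List.nil_append, PySem.Chars.split₀.go, hsp, if_true]
    by_cases hc : cur.isEmpty
    · rw [if_pos hc, split0_go_acc ys [] acc]
      simp [hc]
    · rw [if_neg hc, split0_go_acc ys [] (cur.reverse :: acc)]
      simp [hc]
  | cons c rest ih =>
    intro cur acc
    simp only [List.cons_append, PySem.Chars.split₀.go]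
    by_cases hspc : PySem.Chars.isspace c
    · by_cases hc : cur.isEmpty
      · simp only [hspc, hc, if_true]
        exact ih [] acc
      · simp only [hspc, hc, if_true, if_false, Bool.false_eq_true]
        exact ih [] (cur.reverse :: acc)
    · simp only [hspc, Bool.false_eq_true, if_false]
      exact ih (c :: cur) acc

theorem split0_append_chars (A B : List Char) :
    PySem.Chars.split₀ (A ++ ' ' :: B) = PySem.Chars.split₀ A ++ PySem.Chars.split₀ B := by
  unfold PySem.Chars.split₀
  exact split0_go_space B A [] []

theorem split0_append_str (a b : String) :
    PySem.Str.split₀ (a ++ " " ++ b) = PySem.Str.split₀ a ++ PySem.Str.split₀ b := by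
  rw [PySem.Str.split₀, PySem.Str.split₀, PySem.Str.split₀]
  rw [show (a ++ " " ++ b).toList = a.toList ++ ' ' :: b.toList by simp [String.toList_append]]
  rw [split0_append_chars, List.map_append]

-- ---- the two per-pair computations agree ----

theorem pairRes_eq (a b : String)
    (ha : ∀ t ∈ PySem.Str.split₀ a, goodTok t = true)
    (hb : ∀ t ∈ PySem.Str.split₀ b, goodTok t = true) :
    pairResA a b = pairResB a b := by
  have hg0 : ∀ t ∈ PySem.Str.split₀ (a ++ " " ++ b), goodTok t = true := by
    rw [split0_append_str]
    intro t ht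
    rcases List.mem_append.mp ht with h | h
    exacts [ha t h, hb t h]
  simp only [pairResA, pairResB]
  set s0 := PySem.Str.split₀ (a ++ " " ++ b) with hs0
  have hA : cancelLoop s0 0 0 = (dropB s0 (budget0 s0), totalN s0) := by
    simpa using cancel_main s0.length s0 (Nat.le_refl _) hg0 s0.length 0 0 (by omega)
      (by intro p q hp hq hpk; omega)
  have hsurv : (s0.foldl (fun (st : PySem.Dict (Char × Bool) Int × List String) t =>
      (st.1.insert (tkey t) (st.1.getD (tkey t) 0 + 1),
        if min ((PySem.Dict.counter (s0.map tkey)).getD ((tkey t).1, false) 0)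
            ((PySem.Dict.counter (s0.map tkey)).getD ((tkey t).1, true) 0) ≤
            st.1.getD (tkey t) 0 then st.2 ++ [t] else st.2))
      (PySem.Dict.empty, [])).2 = dropB s0 (budget0 s0) := by
    have hfun : (fun (st : PySem.Dict (Char × Bool) Int × List String) t =>
        (st.1.insert (tkey t) (st.1.getD (tkey t) 0 + 1),
          if min ((PySem.Dict.counter (s0.map tkey)).getD ((tkey t).1, false) 0)
              ((PySem.Dict.counter (s0.map tkey)).getD ((tkey t).1, true) 0) ≤
              st.1.getD (tkey t) 0 then st.2 ++ [t] else st.2)) =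
        (fun (st : PySem.Dict (Char × Bool) Int × List String) t =>
          (st.1.insert (tkey t) (st.1.getD (tkey t) 0 + 1),
            if ((budget0 s0 (tkey t) : Nat) : Int) ≤ st.1.getD (tkey t) 0
            then st.2 ++ [t] else st.2)) := by
      funext st t
      rw [PySem.Dict.getD_counter, PySem.Dict.getD_counter]
      simp [budget0, minsV, cntK, Nat.cast_min]
    rw [hfun]
    have := survFold_gen (budget0 s0) s0 PySem.Dict.empty [] (budget0 s0)
      (fun κ => ⟨0, by simp [PySem.Dict.getD_empty], by omega⟩)
    simpa using this
  rw [hA, cnt_fold_eq, total_eq, hsurv]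
  simp only [Nat.cast_eq_one]
  by_cases h1 : totalN s0 = 1
  · simp only [h1]
    rw [cd_eq, clsJoin_eq]
  · simp only [if_neg h1]

-- ---- the trailing "copy KB[original_len:]" loop is List.drop ----

theorem map_getD_pyRange (xs : List String) : ∀ (n a : Nat), xs.length - a ≤ n →
    (PySem.List.pyRange (a : Int) (xs.length : Int)).map
      (fun c => PySem.List.pyGetD xs c "") = xs.drop a := by
  intro n
  induction n with
  | zero =>
    intro a ha
    have hge : xs.length ≤ a := by omega
    have hempty : PySem.List.pyRange (a : Int) (xs.length : Int) = [] := by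
      apply List.eq_nil_iff_forall_not_mem.mpr
      intro x hx
      have := PySem.List.mem_pyRange_one.mp hx
      omega
    rw [hempty, List.drop_eq_nil_of_le hge]
    rfl
  | succ n ihn =>
    intro a ha
    by_cases hlt : a < xs.length
    · rw [PySem.List.pyRange_one_cons (by exact_mod_cast hlt)]
      rw [List.map_cons]
      rw [PySem.List.pyGetD_natCast, List.getD_eq_getElem xs "" hlt]
      have hcast : ((a : Int) + 1) = (((a + 1 : Nat)) : Int) := by push_cast; ring
      rw [hcast, ihn (a + 1) (by omega)]
      exact (List.drop_eq_getElem_cons hlt).symm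
    · have hge : xs.length ≤ a := by omega
      have hempty : PySem.List.pyRange (a : Int) (xs.length : Int) = [] := by
        apply List.eq_nil_iff_forall_not_mem.mpr
        intro x hx
        have := PySem.List.mem_pyRange_one.mp hx
        omega
      rw [hempty, List.drop_eq_nil_of_le hge]
      rfl

theorem glue (st : List String × Bool) (KB : List String) :
    ((decide ((KB.length : Int) < (cdLoop (KB ++ st.1) 0).length)), st.2,
      (((cdLoop (KB ++ st.1) 0).length : Int) - KB.length), cdLoop (KB ++ st.1) 0,
      (PySem.List.pyRange (KB.length : Int) (((cdLoop (KB ++ st.1) 0).length : Int))).foldl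
        (fun acc c => acc ++ [PySem.List.pyGetD (cdLoop (KB ++ st.1) 0) c ""]) []) =
    ((decide ((0 : Int) < ((PySem.List.dedup (KB ++ st.1)).length : Int) - KB.length)), st.2,
      (((PySem.List.dedup (KB ++ st.1)).length : Int) - KB.length), PySem.List.dedup (KB ++ st.1),
      (PySem.List.dedup (KB ++ st.1)).drop KB.length) := by
  rw [cd_eq]
  set X := PySem.List.dedup (KB ++ st.1) with hX
  refine Prod.ext ?_ (Prod.ext rfl (Prod.ext rfl (Prod.ext rfl ?_)))
  · simp only [decide_eq_decide]
    omega
  · show (PySem.List.pyRange ((KB.length : Nat) : Int) ((X.length : Nat) : Int)).foldl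
        (fun acc c => acc ++ [PySem.List.pyGetD X c ""]) [] = X.drop KB.length
    rw [PySem.List.foldl_append_singleton_eq_map]
    simp only [List.nil_append]
    exact map_getD_pyRange X X.length KB.length (by omega)

-- ===== VERDICT (by name: the statement is the Claim_ definition above) =====
theorem solveKB_spec : Claim_equal_solveKB := by
  intro KB hdom hpre
  unfold Spec_solveKB
  simp only [solveKB, solveKB_alt]
  have hfold : (PySem.List.pyRange 0 (KB.length : Int)).foldl
      (fun (acc : List String × Bool) i =>
        (PySem.List.pyRange (i + 1) (KB.length : Int)).foldl (fun acc2 j =>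
          (acc2.1 ++ (pairResA (PySem.List.pyGetD KB i "") (PySem.List.pyGetD KB j "")).1,
            acc2.2 || (pairResA (PySem.List.pyGetD KB i "") (PySem.List.pyGetD KB j "")).2)) acc)
      ([], false) =
      (PySem.List.pyRange 0 (KB.length : Int)).foldl
      (fun (acc : List String × Bool) i =>
        (PySem.List.pyRange (i + 1) (KB.length : Int)).foldl (fun acc2 j =>
          (acc2.1 ++ (pairResB (PySem.List.pyGetD KB i "") (PySem.List.pyGetD KB j "")).1,
            acc2.2 || (pairResB (PySem.List.pyGetD KB i "") (PySem.List.pyGetD KB j "")).2)) acc)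
      ([], false) := by
    apply PySem.List.foldl_congr_mem
    intro acc i hi
    apply PySem.List.foldl_congr_mem
    intro acc2 j hj
    obtain ⟨hi0, hi1⟩ := PySem.List.mem_pyRange_one.mp hi
    obtain ⟨hj0, hj1⟩ := PySem.List.mem_pyRange_one.mp hj
    have hgood : ∀ (z : Int), 0 ≤ z → z < (KB.length : Int) →
        ∀ t ∈ PySem.Str.split₀ (PySem.List.pyGetD KB z ""), goodTok t = true := by
      intro z hz0 hz1 t ht
      rw [PySem.List.pyGetD_of_nonneg KB "" hz0] at ht
      have hzlen : z.toNat < KB.length := by omega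
      rw [List.getD_eq_getElem KB "" hzlen] at ht
      exact hpre _ (List.getElem_mem hzlen) t ht
    have := pairRes_eq (PySem.List.pyGetD KB i "") (PySem.List.pyGetD KB j "")
      (hgood i hi0 hi1) (hgood j (by omega) hj1)
    simp only [this]
  rw [hfold]
  exact glue _ KB
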